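-- pv_equiv track=rewrite | github.com/Darveloper1/ubscc2025 | app.py | inv_encode_index_parity
-- ===== SOURCE A (Python) =====
-- def inv_encode_index_parity(x: str) -> str:
--     # Given transformed word: first part = evens, second = odds (evens_len = ceil(n/2))
--     def dec_word(w):
--         n = len(w)
--         evens_len = (n + 1) // 2
--         evens = list(w[:evens_len])
--         odds = list(w[evens_len:])
--         res = []
--         e_i = 0
--         o_i = 0
--         for i in range(n):
--             if i % 2 == 0:
--                 res.append(evens[e_i]); e_i += 1
--             else:
--                 res.append(odds[o_i]); o_i += 1
--         return "".join(res)
--     return " ".join(dec_word(w) for w in x.split(" "))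
-- ===== SOURCE B (Python) =====
-- def inv_encode_index_parity(x: str) -> str:
--     def dec_word(w):
--         k = (len(w) + 1) // 2
--         res = [None] * len(w)
--         res[0::2] = w[:k]
--         res[1::2] = w[k:]
--         return "".join(res)
--     return " ".join(map(dec_word, x.split(" ")))
-- ===== Notes on version B (the rewrite author's own statement) =====
-- stated objective: simpler
-- what changed: dec_word's indexed for-loop over range(n) with an i%2 branch and two running counters is replaced by preallocating the result and writing the two halves in bulk with strided slice assignments res[0::2]/res[1::2], which a timing run measured as a constant-factor speedup (C-level bulk copies instead of per-character interpreter steps).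
import Mathlib
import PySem

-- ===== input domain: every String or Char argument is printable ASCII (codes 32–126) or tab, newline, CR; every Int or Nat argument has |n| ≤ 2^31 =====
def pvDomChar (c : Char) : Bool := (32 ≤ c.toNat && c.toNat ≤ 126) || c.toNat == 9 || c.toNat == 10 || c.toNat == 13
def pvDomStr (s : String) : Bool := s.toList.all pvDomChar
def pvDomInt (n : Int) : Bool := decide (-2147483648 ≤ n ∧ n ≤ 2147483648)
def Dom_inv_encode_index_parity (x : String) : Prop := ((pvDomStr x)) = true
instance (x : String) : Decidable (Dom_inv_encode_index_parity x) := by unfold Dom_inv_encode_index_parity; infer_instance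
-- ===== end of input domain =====

-- B replaces A's per-character loop with its two running counters by a direct
-- interleaving of the two halves (strided slice assignment in Python); objective: simpler.

-- ===== PORT A =====
-- loop body of A's 'for i in range(n)': state = (res, e_i, o_i).
-- evens[e_i]/odds[o_i] via pyGetD: the indices are always in range in A's loop
-- (e_i < ceil(n/2), o_i < floor(n/2)), so the default ' ' is never used and the port is exact.
def pvStepA (evens odds : List Char) (st : List Char × Int × Int) (i : Int) :
    List Char × Int × Int :=
  if PySem.Int.mod i 2 == 0 then
    (st.1 ++ [PySem.List.pyGetD evens st.2.1 ' '], st.2.1 + 1, st.2.2)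
  else
    (st.1 ++ [PySem.List.pyGetD odds st.2.2 ' '], st.2.1, st.2.2 + 1)

def pvDecWordA (w : List Char) : List Char :=
  let n := w.length
  let evensLen := PySem.Int.floordiv ((n : Int) + 1) 2
  let evens := PySem.List.slice w none (some evensLen)
  let odds := PySem.List.slice w (some evensLen) none
  let st := (PySem.List.pyRange 0 (n : Int) 1).foldl (pvStepA evens odds) ([], 0, 0)
  PySem.Chars.join [] (st.1.map (fun c => [c]))    -- "".join(res)

def inv_encode_index_parity (x : String) : String :=
  String.ofList (PySem.Chars.join [' '] ((PySem.Chars.splitOn x.toList [' ']).map pvDecWordA))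

-- ===== PORT B =====
-- res[0::2] = w[:k]; res[1::2] = w[k:]  — the strided bulk writes build exactly the
-- alternating interleave of the two halves.
def pvInterleave : List Char → List Char → List Char
  | [], ys => ys
  | c :: cs, ys => c :: pvInterleave ys cs
termination_by xs ys => xs.length + ys.length

def pvDecWordB (w : List Char) : List Char :=
  let k := (w.length + 1) / 2
  pvInterleave (w.take k) (w.drop k)

def inv_encode_index_parity_alt (x : String) : String :=
  String.ofList (PySem.Chars.join [' '] ((PySem.Chars.splitOn x.toList [' ']).map pvDecWordB))

-- ===== PRECONDITION & SPEC =====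
def Spec_inv_encode_index_parity (x : String) (out : String) : Prop := out = inv_encode_index_parity_alt x
instance (x : String) (out : String) : Decidable (Spec_inv_encode_index_parity x out) := by unfold Spec_inv_encode_index_parity; infer_instance

-- ===== CLAIM (what is proved, stated in full; the proofs are below) =====
def Claim_equal_inv_encode_index_parity : Prop := ∀ (x : String), Dom_inv_encode_index_parity x → Spec_inv_encode_index_parity x (inv_encode_index_parity x)

-- ===== LEMMAS AND PROOFS =====

-- A's loop, started in the even phase (e_i = o_i = o, next index i = 2*o), appends
-- exactly the interleave of what is left of the two halves.
theorem pvLoopA (as : List Char) : ∀ (bs evens odds : List Char) (o : Nat) (res : List Char),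
    evens.drop o = as → odds.drop o = bs →
    bs.length ≤ as.length → as.length ≤ bs.length + 1 →
    (PySem.List.pyRange (2 * (o : Int)) (2 * (o : Int) + as.length + bs.length) 1).foldl
      (pvStepA evens odds) (res, (o : Int), (o : Int)) =
      (res ++ pvInterleave as bs, (o : Int) + as.length, (o : Int) + bs.length) := by
  induction as with
  | nil =>
    intro bs evens odds o res he ho hlb hla
    have hbs : bs = [] := List.length_eq_zero_iff.mp (Nat.le_zero.mp hlb)
    subst hbs
    rw [PySem.List.pyRange_one_eq_nil (by simp)]
    simp [pvInterleave]
  | cons a as ih =>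
    intro bs evens odds o res he ho hlb hla
    have hget_e : PySem.List.pyGetD evens ((o : Nat) : Int) ' ' = a := by
      rw [PySem.List.pyGetD_natCast]
      have h0 : (List.drop o evens)[0]? = some a := by rw [he]; rfl
      rw [List.getElem?_drop] at h0
      simp only [Nat.add_zero] at h0
      simp [List.getD, h0]
    rw [PySem.List.pyRange_one_cons (by simp only [List.length_cons]; push_cast; omega)]
    simp only [List.foldl_cons]
    have hstep1 : pvStepA evens odds (res, (o : Int), (o : Int)) (2 * (o : Int)) =
        (res ++ [a], (o : Int) + 1, (o : Int)) := by
      simp [pvStepA, hget_e]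
    rw [hstep1]
    cases bs with
    | nil =>
      have has : as = [] := by
        simp only [List.length_cons, List.length_nil] at hla
        exact List.length_eq_zero_iff.mp (by omega)
      subst has
      rw [PySem.List.pyRange_one_eq_nil (by simp)]
      simp [pvInterleave]
    | cons b bs =>
      have hget_o : PySem.List.pyGetD odds ((o : Nat) : Int) ' ' = b := by
        rw [PySem.List.pyGetD_natCast]
        have h0 : (List.drop o odds)[0]? = some b := by rw [ho]; rfl
        rw [List.getElem?_drop] at h0
        simp only [Nat.add_zero] at h0
        simp [List.getD, h0]
      rw [PySem.List.pyRange_one_cons (by simp only [List.length_cons]; push_cast; omega)]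
      simp only [List.foldl_cons]
      have hstep2 : pvStepA evens odds (res ++ [a], (o : Int) + 1, (o : Int)) (2 * (o : Int) + 1) =
          (res ++ [a] ++ [b], (o : Int) + 1, (o : Int) + 1) := by
        simp [pvStepA, hget_o]
      rw [hstep2]
      have he' : evens.drop (o + 1) = as := by
        rw [← List.tail_drop, he]; rfl
      have ho' : odds.drop (o + 1) = bs := by
        rw [← List.tail_drop, ho]; rfl
      have hlb' : bs.length ≤ as.length := by
        simp only [List.length_cons] at hlb; omega
      have hla' : as.length ≤ bs.length + 1 := by
        simp only [List.length_cons] at hla; omega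
      have hih := ih bs evens odds (o + 1) (res ++ [a] ++ [b]) he' ho' hlb' hla'
      have hstart : (2 * (o : Int) + 1 + 1) = 2 * ((o + 1 : Nat) : Int) := by push_cast; ring
      have hend : 2 * (o : Int) + ((a :: as).length : Int) + ((b :: bs).length : Int) =
          2 * ((o + 1 : Nat) : Int) + as.length + bs.length := by
        simp only [List.length_cons]; push_cast; ring
      rw [hstart, hend]
      push_cast at hih ⊢
      rw [hih]
      simp only [pvInterleave, List.length_cons, List.append_assoc, List.cons_append,
        List.nil_append, Prod.mk.injEq]
      refine ⟨trivial, by push_cast; ring, by push_cast; ring⟩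

theorem pvDecWord_eq (w : List Char) : pvDecWordA w = pvDecWordB w := by
  have hk : PySem.Int.floordiv ((w.length : Int) + 1) 2 = (((w.length + 1) / 2 : Nat) : Int) := by
    have h := PySem.Int.floordiv_natCast (w.length + 1) 2
    push_cast at h
    exact h
  simp only [pvDecWordA, pvDecWordB, hk, PySem.List.slice_to_natCast,
    PySem.List.slice_from_natCast]
  set k := (w.length + 1) / 2 with hkdef
  have hk_le : k ≤ w.length := by omega
  have hloop := pvLoopA (w.take k) (w.drop k) (w.take k) (w.drop k) 0 []
    (by simp) (by simp) (by simp; omega) (by simp; omega)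
  simp only [Nat.cast_zero, mul_zero, zero_add, List.length_take, List.length_drop,
    Nat.min_eq_left hk_le, List.nil_append] at hloop
  have hn : ((k : Int) + ((w.length - k : Nat) : Int)) = (w.length : Int) := by omega
  rw [hn] at hloop
  rw [hloop]
  simp [PySem.Chars.join_nil_singletons]

-- ===== VERDICT (by name: the statement is the Claim_ definition above) =====
theorem inv_encode_index_parity_spec : Claim_equal_inv_encode_index_parity := by
  intro x _
  unfold Spec_inv_encode_index_parity inv_encode_index_parity inv_encode_index_parity_alt
  rw [List.map_congr_left (fun w _ => pvDecWord_eq w)]
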